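-- pv_equiv track=rewrite | github.com/pedroafmonteiro/fp-leic | Week 04 (October 9 - October 15)/Example MT1 to practice/My submissions/exercise4_m.py | check_friendly
-- ===== SOURCE A (Python) =====
-- def check_friendly(number_one, number_two):
--     if number_one == number_two:
--         return f'identical numbers: {number_one}'
--     divisor_one = sum(i for i in range(1, number_one) if number_one % i == 0)
--     divisor_two = sum(i for i in range(1, number_two) if number_two % i == 0)
--     if divisor_one != number_two or divisor_two != number_one:
--         return f'sum of divisors of {number_one} is not {number_two}' if divisor_one != number_two else f'sum of divisors of {number_two} is not {number_one}'
--     return f'{number_one} and {number_two} are friendly'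
-- ===== SOURCE B (Python) =====
-- def _aliquot(n):
--     # sum of proper divisors via sqrt pairing: O(sqrt(n)) instead of O(n)
--     if n < 2:
--         return 0
--     total = 1
--     i = 2
--     while i * i <= n:
--         if n % i == 0:
--             total += i
--             j = n // i
--             if j != i:
--                 total += j
--         i += 1
--     return total
--
--
-- def check_friendly(number_one, number_two):
--     if number_one == number_two:
--         return f'identical numbers: {number_one}'
--     if _aliquot(number_one) != number_two:
--         return f'sum of divisors of {number_one} is not {number_two}'
--     if _aliquot(number_two) != number_one:
--         return f'sum of divisors of {number_two} is not {number_one}'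
--     return f'{number_one} and {number_two} are friendly'
-- ===== Notes on version B (the rewrite author's own statement) =====
-- stated objective: faster
-- what changed: B computes each proper-divisor sum by scanning i only up to sqrt(n) and adding the paired divisors i and n//i (seeded with 1), instead of A's scan of every i in range(1, n).
import Mathlib
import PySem

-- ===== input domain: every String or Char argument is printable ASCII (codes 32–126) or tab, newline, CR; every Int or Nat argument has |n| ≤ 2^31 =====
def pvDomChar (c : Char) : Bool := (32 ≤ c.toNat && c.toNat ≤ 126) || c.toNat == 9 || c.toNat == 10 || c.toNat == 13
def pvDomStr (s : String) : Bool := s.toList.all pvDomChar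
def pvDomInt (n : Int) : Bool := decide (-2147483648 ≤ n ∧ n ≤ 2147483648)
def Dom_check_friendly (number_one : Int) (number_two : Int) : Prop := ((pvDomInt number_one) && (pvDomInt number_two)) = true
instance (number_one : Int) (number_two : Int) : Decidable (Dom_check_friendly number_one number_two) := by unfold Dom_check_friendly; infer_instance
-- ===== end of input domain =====

-- B replaces A's linear scan of range(1, n) for the proper-divisor sum by the paired-divisor
-- scan up to sqrt(n) (objective: faster); the message logic and all return values are identical.

-- ===== PORT A =====
-- sum(i for i in range(1, n) if n % i == 0)
def pvDivSumA (n : Int) : Int :=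
  ((PySem.List.pyRange 1 n 1).filter (fun i => PySem.Int.mod n i == 0)).sum

def check_friendly (number_one : Int) (number_two : Int) : String :=
  if number_one = number_two then
    "identical numbers: " ++ PySem.Int.toStr number_one
  else
    let divisor_one := pvDivSumA number_one
    let divisor_two := pvDivSumA number_two
    if divisor_one ≠ number_two ∨ divisor_two ≠ number_one then
      if divisor_one ≠ number_two then
        "sum of divisors of " ++ PySem.Int.toStr number_one ++ " is not " ++ PySem.Int.toStr number_two
      else
        "sum of divisors of " ++ PySem.Int.toStr number_two ++ " is not " ++ PySem.Int.toStr number_one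
    else
      PySem.Int.toStr number_one ++ " and " ++ PySem.Int.toStr number_two ++ " are friendly"

-- ===== PORT B =====
-- the while loop of _aliquot: i runs from 2 while i*i <= n
def pvSqLoopB (n : Int) (i : Int) (total : Int) : Int :=
  if _h : i * i ≤ n then
    pvSqLoopB n (i + 1)
      (if PySem.Int.mod n i = 0 then
         (let j := PySem.Int.floordiv n i
          if j ≠ i then total + i + j else total + i)
       else total)
  else total
termination_by (n + 1 - i).toNat
decreasing_by
  have hin : i ≤ n := by
    by_cases h0 : i ≤ 0
    · have := mul_self_nonneg i; omega
    · have : i ≤ i * i := le_mul_of_one_le_left (by omega) (by omega)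
      omega
  omega

def pvAliquotB (n : Int) : Int :=
  if n < 2 then 0 else pvSqLoopB n 2 1

def check_friendly_alt (number_one : Int) (number_two : Int) : String :=
  if number_one = number_two then
    "identical numbers: " ++ PySem.Int.toStr number_one
  else if pvAliquotB number_one ≠ number_two then
    "sum of divisors of " ++ PySem.Int.toStr number_one ++ " is not " ++ PySem.Int.toStr number_two
  else if pvAliquotB number_two ≠ number_one then
    "sum of divisors of " ++ PySem.Int.toStr number_two ++ " is not " ++ PySem.Int.toStr number_one
  else
    PySem.Int.toStr number_one ++ " and " ++ PySem.Int.toStr number_two ++ " are friendly"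

-- ===== PRECONDITION & SPEC =====
def Spec_check_friendly (number_one : Int) (number_two : Int) (out : String) : Prop := out = check_friendly_alt number_one number_two
instance (number_one : Int) (number_two : Int) (out : String) : Decidable (Spec_check_friendly number_one number_two out) := by unfold Spec_check_friendly; infer_instance

-- ===== CLAIM (what is proved, stated in full; the proofs are below) =====
def Claim_equal_check_friendly : Prop := ∀ (number_one : Int) (number_two : Int), Dom_check_friendly number_one number_two → Spec_check_friendly number_one number_two (check_friendly number_one number_two)

-- ===== LEMMAS AND PROOFS =====

-- the contribution of one loop index k of B's sqrt scan, as a Nat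
def pvG (m k : Nat) : Nat :=
  if k ∣ m then (if m / k ≠ k then k + m / k else k) else 0

lemma pvG_split (m k : Nat) :
    pvG m k = (if k ∣ m then k else 0) + (if k ∣ m ∧ m / k ≠ k then m / k else 0) := by
  unfold pvG
  by_cases h1 : k ∣ m <;> by_cases h2 : m / k ≠ k <;> simp [h1, h2]

-- B's paired sqrt scan over 1..sqrt(m) sums exactly all divisors of m
lemma pvG_sum_divisors (m : Nat) (hm : 1 ≤ m) :
    ∑ k ∈ Finset.Ico 1 (Nat.sqrt m + 1), pvG m k = ∑ d ∈ m.divisors, d := by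
  have hm0 : m ≠ 0 := by omega
  calc ∑ k ∈ Finset.Ico 1 (Nat.sqrt m + 1), pvG m k
      = (∑ k ∈ Finset.Ico 1 (Nat.sqrt m + 1), if k ∣ m then k else 0)
        + ∑ k ∈ Finset.Ico 1 (Nat.sqrt m + 1), if k ∣ m ∧ m / k ≠ k then m / k else 0 := by
        rw [← Finset.sum_add_distrib]
        exact Finset.sum_congr rfl (fun k _ => pvG_split m k)
    _ = (∑ d ∈ m.divisors.filter (fun d => d * d ≤ m), d)
        + ∑ d ∈ m.divisors.filter (fun d => ¬ d * d ≤ m), d := by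
        congr 1
        · rw [← Finset.sum_filter]
          apply Finset.sum_congr _ (fun _ _ => rfl)
          ext d
          simp only [Finset.mem_filter, Finset.mem_Ico, Nat.mem_divisors, Nat.lt_succ_iff,
            Nat.le_sqrt]
          constructor
          · rintro ⟨⟨h1, h2⟩, h3⟩; exact ⟨⟨h3, hm0⟩, h2⟩
          · rintro ⟨⟨h1, _⟩, h2⟩
            exact ⟨⟨Nat.pos_of_dvd_of_pos h1 hm, h2⟩, h1⟩
        · rw [← Finset.sum_filter]
          apply Finset.sum_nbij' (fun k => m / k) (fun d => m / d)
          · rintro k hk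
            simp only [Finset.mem_filter, Finset.mem_Ico, Nat.lt_succ_iff, Nat.le_sqrt] at hk ⊢
            obtain ⟨⟨hk1, hkk⟩, hd, hne⟩ := hk
            have h1 : k * (m / k) = m := Nat.mul_div_cancel' hd
            have hlt : k < m / k := by
              have : k ≤ m / k := (Nat.le_div_iff_mul_le (by omega)).mpr (by nlinarith)
              omega
            refine ⟨Nat.mem_divisors.mpr ⟨Nat.div_dvd_of_dvd hd, hm0⟩, by nlinarith⟩
          · rintro d hd
            simp only [Finset.mem_filter, Nat.mem_divisors, Finset.mem_Ico, Nat.lt_succ_iff,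
              Nat.le_sqrt] at hd ⊢
            obtain ⟨⟨hdd, _⟩, hgt⟩ := hd
            have h1 : (m / d) * d = m := Nat.div_mul_cancel hdd
            have hlt : m / d < d := by
              by_contra hc
              push_neg at hc
              nlinarith
            have hpos : 1 ≤ m / d :=
              Nat.one_le_div_iff (Nat.pos_of_dvd_of_pos hdd hm) |>.mpr (Nat.le_of_dvd hm hdd)
            refine ⟨⟨hpos, by nlinarith⟩, Nat.div_dvd_of_dvd hdd, ?_⟩
            rw [Nat.div_div_self hdd hm0]
            omega
          · rintro k hk
            simp only [Finset.mem_filter] at hk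
            exact Nat.div_div_self hk.2.1 hm0
          · rintro d hd
            simp only [Finset.mem_filter, Nat.mem_divisors] at hd
            exact Nat.div_div_self hd.1.1 hm0
          · intro k _; rfl
    _ = ∑ d ∈ m.divisors, d := Finset.sum_filter_add_sum_filter_not _ _ _

-- unrolling B's loop: it accumulates pvG over the indices i..sqrt(m)
lemma pvSqLoopB_spec (m : Nat) (i total : Int) (hi : 1 ≤ i) :
    pvSqLoopB (m : Int) i total
      = total + ∑ k ∈ Finset.Ico i.toNat (Nat.sqrt m + 1), (pvG m k : Int) := by
  induction hfuel : Nat.sqrt m + 1 - i.toNat generalizing i total with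
  | zero =>
    obtain ⟨k, rfl⟩ := Int.eq_ofNat_of_zero_le (by omega : (0:ℤ) ≤ i)
    have hgt : Nat.sqrt m < k := by omega
    have hni : ¬ (k : Int) * (k : Int) ≤ (m : Int) := by
      have : m < k * k := Nat.sqrt_lt.mp hgt
      exact_mod_cast not_le.mpr this
    rw [pvSqLoopB, dif_neg hni, Finset.Ico_eq_empty (by omega), Finset.sum_empty, add_zero]
  | succ s ih =>
    obtain ⟨k, rfl⟩ := Int.eq_ofNat_of_zero_le (by omega : (0:ℤ) ≤ i)
    have hk1 : 1 ≤ k := by omega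
    have hle : k ≤ Nat.sqrt m := by omega
    have hyes : (k : Int) * (k : Int) ≤ (m : Int) := by exact_mod_cast Nat.le_sqrt.mp hle
    rw [pvSqLoopB, dif_pos hyes]
    have hcast : (k : Int) + 1 = ((k + 1 : Nat) : Int) := by push_cast; ring
    rw [hcast, ih (k + 1 : Nat) _ (by omega) (by simp; omega)]
    rw [Finset.sum_eq_sum_Ico_succ_bot (a := (k:Int).toNat) (by omega) _]
    have hstep :
        (if PySem.Int.mod (m : Int) (k : Int) = 0 then
           (let j := PySem.Int.floordiv (m : Int) (k : Int)
            if j ≠ (k : Int) then total + (k : Int) + j else total + (k : Int))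
         else total) = total + (pvG m k : Int) := by
      rw [PySem.Int.mod_natCast, PySem.Int.floordiv_natCast]
      unfold pvG
      by_cases hd : k ∣ m
      · have hmod : m % k = 0 := by obtain ⟨c, rfl⟩ := hd; simp
        by_cases hne : m / k = k
        · simp [hmod, hne, hd]
        · have hne' : ((m / k : Nat) : Int) ≠ ((k : Nat) : Int) := by exact_mod_cast hne
          simp only [hmod, Nat.cast_zero, hne', ne_eq, not_false_iff, hd, if_pos, hne]
          push_cast
          ring
      · have hmod : ((m % k : Nat) : Int) ≠ 0 := by
          exact_mod_cast fun hc => hd (Nat.dvd_of_mod_eq_zero hc)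
        simp [hd, Int.natCast_dvd_natCast]
    rw [hstep]
    have h2 : ((k : Int)).toNat = k := by omega
    rw [h2]
    simp [add_assoc]

-- 'sum(i for i in range(1, n) if n % i == 0)' in a list is the proper-divisor sum
lemma pvList_sum_filter (p : Int → Bool) (l : List Int) :
    (l.filter p).sum = (l.map (fun x => if p x then x else 0)).sum := by
  induction l with
  | nil => rfl
  | cons x t ih =>
    by_cases h : p x <;> simp [h, ih]

lemma pvDivSumA_eq (m : Nat) :
    pvDivSumA (m : Int) = ((∑ d ∈ m.properDivisors, d : Nat) : Int) := by
  unfold pvDivSumA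
  rw [PySem.List.pyRange_one, pvList_sum_filter, List.map_map]
  have h1 : ((m : Int) - 1).toNat = m - 1 := by omega
  rw [h1]
  have hr : ∀ (F : Nat → Int), ((List.range (m - 1)).map F).sum = ∑ j ∈ Finset.range (m - 1), F j :=
    fun _ => rfl
  rw [hr]
  have h2 : ∀ j ∈ Finset.range (m - 1),
      ((fun x => if (PySem.Int.mod (m : Int) x == 0) then x else 0) ∘ fun k : Nat => 1 + (k : Int)) j
      = (if (1 + j) ∣ m then ((1 + j : Nat) : Int) else 0) := by
    intro j _
    simp only [Function.comp]
    by_cases hd : (1 + j) ∣ m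
    · have hz : PySem.Int.mod (m : Int) (1 + (j : Int)) = 0 := by
        rw [PySem.Int.mod_eq_zero_iff_dvd]
        exact_mod_cast Int.natCast_dvd_natCast.mpr hd
      simp [hz, hd]
      try push_cast
      try ring
    · have hz : PySem.Int.mod (m : Int) (1 + (j : Int)) ≠ 0 := by
        rw [Ne, PySem.Int.mod_eq_zero_iff_dvd]
        intro hc
        exact hd (by exact_mod_cast hc)
      simp [hz, hd]
  rw [Finset.sum_congr rfl h2]
  have h3 : ∑ j ∈ Finset.range (m - 1), (if (1 + j) ∣ m then ((1 + j : Nat) : Int) else 0)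
      = ∑ d ∈ Finset.Ico 1 m, (if d ∣ m then (d : Int) else 0) := by
    rw [Finset.sum_Ico_eq_sum_range]
  rw [h3, ← Finset.sum_filter]
  have h4 : Finset.filter (fun d => d ∣ m) (Finset.Ico 1 m) = m.properDivisors := by
    ext d
    simp only [Finset.mem_filter, Finset.mem_Ico, Nat.mem_properDivisors]
    constructor
    · rintro ⟨⟨h5, h6⟩, h7⟩; exact ⟨h7, h6⟩
    · rintro ⟨h7, h6⟩
      exact ⟨⟨Nat.pos_of_dvd_of_pos h7 (by omega), h6⟩, h7⟩
  rw [h4]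
  push_cast
  rfl

-- the two divisor-sum computations agree on every Int
lemma pvDivSum_eq_aliquot (n : Int) : pvDivSumA n = pvAliquotB n := by
  by_cases hn : n < 2
  · unfold pvDivSumA pvAliquotB
    rw [PySem.List.pyRange_one_eq_nil (by omega)]
    simp [hn]
  · obtain ⟨m, rfl⟩ := Int.eq_ofNat_of_zero_le (by omega : (0:ℤ) ≤ n)
    have hm : 2 ≤ m := by omega
    unfold pvAliquotB
    rw [if_neg hn, pvSqLoopB_spec m 2 1 (by omega), pvDivSumA_eq]
    have h2 : ((2:Int)).toNat = 2 := rfl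
    rw [h2]
    have hP : ∑ k ∈ Finset.Ico 1 (Nat.sqrt m + 1), pvG m k = ∑ d ∈ m.divisors, d :=
      pvG_sum_divisors m (by omega : 1 ≤ m)
    have hsplit : ∑ k ∈ Finset.Ico 1 (Nat.sqrt m + 1), pvG m k
        = pvG m 1 + ∑ k ∈ Finset.Ico 2 (Nat.sqrt m + 1), pvG m k := by
      have := Finset.sum_eq_sum_Ico_succ_bot (a := 1) (b := Nat.sqrt m + 1)
        (by have := Nat.sqrt_pos.mpr (show 0 < m by omega); omega : 1 < Nat.sqrt m + 1) (fun k => pvG m k)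
      simpa using this
    have hg1 : pvG m 1 = 1 + m := by
      unfold pvG
      rw [if_pos (one_dvd m), Nat.div_one, if_pos (by omega)]
    have hdiv : ∑ d ∈ m.divisors, d = ∑ d ∈ m.properDivisors, d + m :=
      Nat.sum_divisors_eq_sum_properDivisors_add_self
    have hkey : ∑ d ∈ m.properDivisors, d = 1 + ∑ k ∈ Finset.Ico 2 (Nat.sqrt m + 1), pvG m k := by
      omega
    rw [hkey]
    push_cast
    ring

-- ===== VERDICT (by name: the statement is the Claim_ definition above) =====
theorem check_friendly_spec : Claim_equal_check_friendly := by
  intro n1 n2 _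
  unfold Spec_check_friendly check_friendly check_friendly_alt
  rw [pvDivSum_eq_aliquot, pvDivSum_eq_aliquot]
  dsimp only
  split_ifs <;> tauto
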